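-- pv_equiv track=rewrite | github.com/JoeLuker/Vardon | generateGameRules.py | generate_relationships_interface
-- ===== SOURCE A (Python) =====
-- from typing import List, Dict, Tuple, Any
--
-- def to_ts_name(db_name: str, pascal: bool = False) -> str:
--     """Convert database name to TypeScript name"""
--     words = db_name.split('_')
--     if pascal:
--         return ''.join(w.title() for w in words)
--     return words[0] + ''.join(w.title() for w in words[1:])
--
-- def generate_relationships_interface(relationships: Dict[str, List[Tuple[str, str]]]) -> str:
--     """Generate TypeScript interface for relationship caching"""
--     relationship_map = {}
--
--     for table, rels in relationships.items():
--         for column, foreign_table in rels: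
--             if foreign_table not in relationship_map:
--                 relationship_map[foreign_table] = set()
--             relationship_map[foreign_table].add(column)
--
--     cache_types = []
--     for foreign_table, columns in sorted(relationship_map.items()):
--         for column in sorted(columns):
--             cache_name = f"{to_ts_name(foreign_table)}By{to_ts_name(column, True)}"
--             foreign_type = to_ts_name(foreign_table, True)
--             cache_types.append(f"    {cache_name}: Record<number, {foreign_type}[]>;")
--
--     return """
-- /** Relationship cache structure */
-- export interface GameRuleRelationships {
-- """ + "\n".join(cache_types) + "\n}"
-- ===== SOURCE B (Python) =====
-- def to_ts_name(db_name: str, pascal: bool = False) -> str: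
--     """Convert database name to TypeScript name"""
--     words = db_name.split('_')
--     if pascal:
--         return ''.join(w.title() for w in words)
--     return words[0] + ''.join(w.title() for w in words[1:])
--
-- def generate_relationships_interface(relationships):
--     """Generate TypeScript interface for relationship caching"""
--     # No dict, no set: sort the raw pair multiset, then emit a line only when
--     # the pair differs from its predecessor (dedupe by adjacency).
--     raw = [(foreign_table, column)
--            for rels in relationships.values()
--            for column, foreign_table in rels]
--     raw.sort()
--     cache_types = []
--     prev = None
--     for pair in raw:
--         if pair != prev:
--             ft, column = pair
--             cache_types.append(
--                 f"    {to_ts_name(ft)}By{to_ts_name(column, True)}: Record<number, {to_ts_name(ft, True)}[]>;")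
--             prev = pair
--     return """
-- /** Relationship cache structure */
-- export interface GameRuleRelationships {
-- """ + "\n".join(cache_types) + "\n}"
-- ===== Notes on version B (the rewrite author's own statement) =====
-- stated objective: alternative
-- what changed: A groups columns per foreign table into a dict of sets and emits lines from nested sorted loops; B builds no dict or set at all: it sorts the raw (foreign_table, column) pair list with its duplicates and in one scan emits a line only when the pair differs from its predecessor (deduplication by adjacency in sorted order).
import Mathlib
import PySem

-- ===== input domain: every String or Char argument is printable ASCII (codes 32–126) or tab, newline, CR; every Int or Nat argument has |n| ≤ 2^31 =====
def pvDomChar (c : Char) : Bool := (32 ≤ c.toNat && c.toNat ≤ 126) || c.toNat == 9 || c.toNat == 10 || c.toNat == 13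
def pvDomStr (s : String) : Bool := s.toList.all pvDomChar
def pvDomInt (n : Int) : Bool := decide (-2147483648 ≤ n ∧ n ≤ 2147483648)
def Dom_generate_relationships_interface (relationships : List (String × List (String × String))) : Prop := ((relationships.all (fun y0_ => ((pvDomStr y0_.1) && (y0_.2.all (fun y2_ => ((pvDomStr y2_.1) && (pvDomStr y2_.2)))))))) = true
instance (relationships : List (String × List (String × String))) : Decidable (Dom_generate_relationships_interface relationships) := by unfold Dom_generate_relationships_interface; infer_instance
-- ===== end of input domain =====

-- B builds no dict or set: it sorts the raw (foreign_table, column) pair list with duplicates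
-- and emits a line only when a pair differs from its predecessor (objective: alternative).

-- ===== PORT A =====

-- str.title(), hand-ported (PySem has no title): exact on ASCII, where a "cased" character is
-- exactly a letter — a letter after a letter is lowercased, a letter after a non-letter uppercased.
def pyTitleChars : List Char → Bool → List Char
  | [], _ => []
  | c :: rest, prevCased =>
      if PySem.Chars.isalpha c then
        (if prevCased then PySem.Chars.lowerChar c else PySem.Chars.upperChar c) :: pyTitleChars rest true
      else
        c :: pyTitleChars rest false

def pyTitle (s : String) : String := String.ofList (pyTitleChars s.toList false)

-- shared module helper of both Pythons
def to_ts_name (db_name : String) (pascal : Bool) : String :=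
  let words := (PySem.Str.split? db_name "_").getD []   -- split? is some: the separator "_" is nonempty
  if pascal then PySem.Str.join "" (words.map pyTitle)
  -- words[0] never raises: split always returns at least one piece
  else words.headD "" ++ PySem.Str.join "" ((words.drop 1).map pyTitle)

-- the f-string  f"    {to_ts_name(ft)}By{to_ts_name(col, True)}: Record<number, {to_ts_name(ft, True)}[]>;"
-- (identical in Source A and Source B)
def mkCacheLine (ft col : String) : String :=
  "    " ++ to_ts_name ft false ++ "By" ++ to_ts_name col true ++ ": Record<number, " ++ to_ts_name ft true ++ "[]>;"

def pvHeader : String := "\n/** Relationship cache structure */\nexport interface GameRuleRelationships {\n"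

def generate_relationships_interface (relationships : List (String × List (String × String))) : String :=
  let relationship_map : PySem.Dict String (PySem.Set String) :=
    relationships.foldl
      (fun rm t => t.2.foldl
        (fun rm cf =>
          let rm' := if rm.contains cf.2 then rm else rm.insert cf.2 PySem.Set.empty
          rm'.modify cf.2 PySem.Set.empty (fun s => PySem.Set.add s cf.1))
        rm)
      PySem.Dict.empty
  -- sorted(relationship_map.items()): dict keys are unique, so Python's tuple sort never reaches
  -- the (unorderable) set component — sorting by the key is exact
  let cache_types : List String :=
    (PySem.List.sorted relationship_map.items (fun p => p.1)).foldl
      (fun acc g => (PySem.List.sorted g.2 (fun c => c)).foldl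
        (fun acc column => acc ++ [mkCacheLine g.1 column]) acc)
      []
  pvHeader ++ PySem.Str.join "\n" cache_types ++ "\n}"

-- ===== PORT B =====

def generate_relationships_interface_alt (relationships : List (String × List (String × String))) : String :=
  -- raw = [(ft, col) for rels in relationships.values() for col, ft in rels]
  let raw : List (String × String) :=
    relationships.flatMap (fun t => t.2.map (fun cf => (cf.2, cf.1)))
  -- raw.sort() — Python sorts the tuples lexicographically
  let raw' := PySem.List.sorted2 raw (fun p => p.1) (fun p => p.2)
  -- the scan: state = (cache_types, prev); append a line only when pair != prev
  let cache_types : List String :=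
    (raw'.foldl
      (fun st pair =>
        if st.2 = some pair then st
        else (st.1 ++ [mkCacheLine pair.1 pair.2], some pair))
      (([] : List String), (none : Option (String × String)))).1
  pvHeader ++ PySem.Str.join "\n" cache_types ++ "\n}"

-- ===== PRECONDITION & SPEC =====
def Spec_generate_relationships_interface (relationships : List (String × List (String × String))) (out : String) : Prop := out = generate_relationships_interface_alt relationships
instance (relationships : List (String × List (String × String))) (out : String) : Decidable (Spec_generate_relationships_interface relationships out) := by unfold Spec_generate_relationships_interface; infer_instance

-- ===== CLAIM (what is proved, stated in full; the proofs are below) =====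
def Claim_equal_generate_relationships_interface : Prop := ∀ (relationships : List (String × List (String × String))), Dom_generate_relationships_interface relationships → Spec_generate_relationships_interface relationships (generate_relationships_interface relationships)

-- ===== LEMMAS AND PROOFS =====

-- the flat (foreign_table, column) stream both loops consume
def pvRaw (relationships : List (String × List (String × String))) : List (String × String) :=
  relationships.flatMap (fun t => t.2.map (fun cf => (cf.2, cf.1)))

-- a nested fold over the table/rels structure is a fold over the flat pair stream
theorem pv_foldl_raw {γ : Type} (relationships : List (String × List (String × String)))
    (f : γ → String × String → γ) (init : γ) :
    relationships.foldl (fun acc t => t.2.foldl (fun acc cf => f acc (cf.2, cf.1)) acc) init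
      = (pvRaw relationships).foldl f init := by
  induction relationships generalizing init with
  | nil => rfl
  | cons t rest ih =>
      simp only [pvRaw, List.flatMap_cons, List.foldl_append, List.foldl_cons, List.foldl_map] at *
      rw [ih]

-- A's "if absent, insert empty set; then add" is a single modify-with-default
theorem pv_step_modify (d : PySem.Dict String (PySem.Set String)) (k c : String) :
    (let d' := if d.contains k then d else d.insert k PySem.Set.empty
     d'.modify k PySem.Set.empty (fun s => PySem.Set.add s c))
      = d.modify k PySem.Set.empty (fun s => PySem.Set.add s c) := by
  by_cases h : d.contains k = true
  · simp [h]
  · simp only [Bool.not_eq_true] at h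
    simp [h, PySem.Dict.modify, PySem.Dict.insert_insert_self, PySem.Dict.getD_insert_self,
      PySem.Dict.getD_of_not_contains _ _ h]

-- value of the grouping dict at any key
theorem pv_getD_foldl (l : List (String × String)) (d : PySem.Dict String (PySem.Set String)) (c : String) :
    (l.foldl (fun d p => d.modify p.1 PySem.Set.empty (fun s => PySem.Set.add s p.2)) d).getD c PySem.Set.empty
      = PySem.Set.update (d.getD c PySem.Set.empty) ((l.filter (fun p => p.1 == c)).map (·.2)) := by
  induction l generalizing d with
  | nil => rfl
  | cons p rest ih =>
      simp only [List.foldl_cons, ih, List.filter_cons]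
      by_cases h : p.1 = c
      · subst h
        simp [PySem.Set.update]
      · have h2 : ¬ c = p.1 := fun hc => h hc.symm
        simp [h, h2, PySem.Set.update, PySem.Dict.getD_modify]

-- sorted2 with two keys is sorted with the lexicographic key
theorem pv_sorted2_eq_sorted_lex (xs : List (String × String)) :
    PySem.List.sorted2 xs (fun p => p.1) (fun p => p.2)
      = PySem.List.sorted xs (fun p => toLex p) := by
  have hbf : (fun a b : String × String =>
        decide (a.1 < b.1) || !decide (b.1 < a.1) && decide (a.2 < b.2))
      = (fun a b : String × String => decide (toLex a < toLex b)) := by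
    funext a b
    have hiff : ((toLex a < toLex b)) ↔ (a.1 < b.1 ∨ (¬ b.1 < a.1 ∧ a.2 < b.2)) := by
      rw [Prod.Lex.lt_iff]
      simp only [ofLex_toLex]
      constructor
      · rintro (h | ⟨he, h2⟩)
        · exact Or.inl h
        · refine Or.inr ⟨?_, h2⟩
          rw [he]; exact lt_irrefl _
      · rintro (h | ⟨hnb, h2⟩)
        · exact Or.inl h
        · by_cases ha : a.1 < b.1
          · exact Or.inl ha
          · exact Or.inr ⟨le_antisymm (not_lt.mp hnb) (not_lt.mp ha), h2⟩
    rw [show decide (toLex a < toLex b)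
          = decide (a.1 < b.1 ∨ (¬ b.1 < a.1 ∧ a.2 < b.2)) from decide_eq_decide.mpr hiff,
      Bool.decide_or, Bool.decide_and, decide_not]
  show xs.foldl (fun acc x => PySem.List.insertBy
        (fun a b : String × String =>
          decide (a.1 < b.1) || !decide (b.1 < a.1) && decide (a.2 < b.2)) x acc) []
      = xs.foldl (fun acc x => PySem.List.insertBy
        (fun a b : String × String => decide (toLex a < toLex b)) x acc) []
  rw [hbf]

-- columns grouped under a foreign table, as A's dict stores them
def pvCols (relationships : List (String × List (String × String))) (c : String) : PySem.Set String :=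
  PySem.Set.ofList (((pvRaw relationships).filter (fun p => p.1 == c)).map (·.2))

theorem pv_mem_cols (relationships : List (String × List (String × String))) (c x : String) :
    x ∈ pvCols relationships c ↔ (c, x) ∈ pvRaw relationships := by
  simp only [pvCols, PySem.Set.mem_ofList, List.mem_map, List.mem_filter, beq_iff_eq]
  constructor
  · rintro ⟨p, ⟨hp, rfl⟩, rfl⟩; exact hp
  · intro h; exact ⟨(c, x), ⟨h, rfl⟩, rfl⟩

-- A's dict after the build loop: keys, values, key-uniqueness
def pvDictA (relationships : List (String × List (String × String))) : PySem.Dict String (PySem.Set String) :=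
  (pvRaw relationships).foldl (fun d p => d.modify p.1 PySem.Set.empty (fun s => PySem.Set.add s p.2)) PySem.Dict.empty

theorem pv_dictA_keys (relationships : List (String × List (String × String))) :
    (pvDictA relationships).keys = PySem.Set.ofList ((pvRaw relationships).map (·.1)) := by
  rw [pvDictA, PySem.Dict.keys_foldl_modify_key (pvRaw relationships) (fun p => p.1)
    PySem.Set.empty (fun _ p => fun s => PySem.Set.add s p.2) PySem.Dict.empty]
  rfl

theorem pv_dictA_nodup_keys (relationships : List (String × List (String × String))) :
    (pvDictA relationships).keys.Nodup :=
  PySem.Dict.nodup_keys_foldl_modify_key (pvRaw relationships) (fun p => p.1) PySem.Set.empty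
    (fun _ p => fun s => PySem.Set.add s p.2) PySem.Dict.empty (by simp [PySem.Dict.keys_empty])

theorem pv_dictA_getD (relationships : List (String × List (String × String))) (c : String) :
    (pvDictA relationships).getD c PySem.Set.empty = pvCols relationships c := by
  rw [pvDictA, pv_getD_foldl]; rfl

theorem pv_dictA_items (relationships : List (String × List (String × String))) :
    (pvDictA relationships).items
      = (PySem.Set.ofList ((pvRaw relationships).map (·.1))).map
          (fun k => (k, pvCols relationships k)) := by
  rw [PySem.Dict.items_eq_map_keys _ (pv_dictA_nodup_keys relationships) PySem.Set.empty,
    pv_dictA_keys]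
  exact List.map_congr_left (fun k _ => by rw [pv_dictA_getD])

-- the pair list A effectively enumerates
def pvPairsA (relationships : List (String × List (String × String))) : List (String × String) :=
  (PySem.List.sorted (pvDictA relationships).items (fun p => p.1)).flatMap
    (fun g => (PySem.List.sorted g.2 (fun c => c)).map (fun c => (g.1, c)))

theorem pv_pairsA_mem (relationships : List (String × List (String × String))) (x : String × String) :
    x ∈ pvPairsA relationships ↔ x ∈ pvRaw relationships := by
  simp only [pvPairsA, List.mem_flatMap, List.mem_map,
    (PySem.List.sorted_perm _ _ _).mem_iff, pv_dictA_items]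
  constructor
  · rintro ⟨g, ⟨k, hk, rfl⟩, c, hc, rfl⟩
    exact (pv_mem_cols relationships k c).mp hc
  · intro hx
    refine ⟨(x.1, pvCols relationships x.1), ⟨x.1, ?_, rfl⟩, x.2, ?_, rfl⟩
    · rw [PySem.Set.mem_ofList]; exact List.mem_map_of_mem hx
    · exact (pv_mem_cols relationships x.1 x.2).mpr (by simpa using hx)

theorem pv_pairsA_pairwise (relationships : List (String × List (String × String))) :
    (pvPairsA relationships).Pairwise (fun x y => toLex x < toLex y) := by
  rw [pvPairsA, List.flatMap, List.pairwise_flatten]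
  constructor
  · intro l hl
    simp only [List.mem_map] at hl
    obtain ⟨g, hg, rfl⟩ := hl
    rw [List.pairwise_map]
    -- inside one group: same first component, strictly increasing second
    have hg' : g ∈ (pvDictA relationships).items := (PySem.List.sorted_perm _ _ _).mem_iff.mp hg
    have hnd : g.2.Nodup := by
      rw [pv_dictA_items] at hg'
      obtain ⟨k, _, rfl⟩ := List.mem_map.mp hg'
      exact PySem.Set.nodup_ofList _
    have hle := PySem.List.sorted_pairwise g.2 (fun c => c)
    have hne : (PySem.List.sorted g.2 (fun c => c)).Pairwise (fun a b => a ≠ b) :=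
      ((PySem.List.sorted_perm g.2 (fun c => c) false).nodup_iff.mpr hnd)
    refine (hle.and hne).imp ?_
    rintro a b ⟨h1, h2⟩
    rw [Prod.Lex.lt_iff]
    exact Or.inr ⟨rfl, lt_of_le_of_ne h1 h2⟩
  · rw [List.pairwise_map]
    -- across groups: strictly increasing first components
    have hle := PySem.List.sorted_pairwise (pvDictA relationships).items (fun p => p.1)
    have hnodup : ((PySem.List.sorted (pvDictA relationships).items (fun p => p.1)).map (fun g => g.1)).Nodup := by
      refine ((PySem.List.sorted_perm _ _ false).map
        (fun g : String × PySem.Set String => g.1)).nodup_iff.mpr ?_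
      have : (pvDictA relationships).items.map (fun g => g.1) = (pvDictA relationships).keys := rfl
      rw [this]; exact pv_dictA_nodup_keys relationships
    have hne := (List.pairwise_map.mp hnodup)
    refine ((hle.and hne).imp ?_)
    rintro g₁ g₂ ⟨h1, h2⟩ x hx y hy
    simp only [List.mem_map] at hx hy
    obtain ⟨c₁, _, rfl⟩ := hx
    obtain ⟨c₂, _, rfl⟩ := hy
    rw [Prod.Lex.lt_iff]
    exact Or.inl (lt_of_le_of_ne h1 h2)

theorem pv_pairsA_nodup (relationships : List (String × List (String × String))) :
    (pvPairsA relationships).Nodup :=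
  (pv_pairsA_pairwise relationships).imp (fun h => fun he => absurd (he ▸ h) (lt_irrefl _))

-- ---- B-side: the adjacent-dedupe scan ----

-- the pair stream B's scan keeps (reference recursion for the foldl state machine)
def pvDedup : Option (String × String) → List (String × String) → List (String × String)
  | _, [] => []
  | prev, p :: rest => if prev = some p then pvDedup prev rest else p :: pvDedup (some p) rest

-- B's foldl scan computes map-line over pvDedup
theorem pv_scan_eq_dedup (l : List (String × String)) (acc : List String) (prev : Option (String × String)) :
    (l.foldl
      (fun st pair =>
        if st.2 = some pair then st
        else (st.1 ++ [mkCacheLine pair.1 pair.2], some pair))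
      (acc, prev)).1
      = acc ++ (pvDedup prev l).map (fun p => mkCacheLine p.1 p.2) := by
  induction l generalizing acc prev with
  | nil => simp [pvDedup]
  | cons p rest ih =>
      by_cases h : prev = some p
      · simp [pvDedup, h, ih]
      · simp [pvDedup, h, ih, List.append_assoc]

theorem pv_dedup_subset (prev : Option (String × String)) (l : List (String × String))
    (x : String × String) (hx : x ∈ pvDedup prev l) : x ∈ l := by
  induction l generalizing prev with
  | nil => simp [pvDedup] at hx
  | cons p rest ih =>
      rw [pvDedup] at hx
      split at hx
      · exact List.mem_cons_of_mem _ (ih _ hx)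
      · rcases List.mem_cons.mp hx with rfl | h
        · exact List.mem_cons_self
        · exact List.mem_cons_of_mem _ (ih _ h)

theorem pv_dedup_cover (prev : Option (String × String)) (l : List (String × String))
    (x : String × String) (hx : x ∈ l) : x ∈ pvDedup prev l ∨ prev = some x := by
  induction l generalizing prev with
  | nil => cases hx
  | cons p rest ih =>
      rw [pvDedup]
      rcases List.mem_cons.mp hx with rfl | h
      · by_cases hp : prev = some x
        · exact Or.inr hp
        · simp [hp]
      · by_cases hp : prev = some p
        · rw [if_pos hp]
          exact ih prev h
        · rw [if_neg hp]
          rcases ih (some p) h with h1 | h1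
          · exact Or.inl (List.mem_cons_of_mem _ h1)
          · left; injection h1 with h2; subst h2; exact List.mem_cons_self

-- on a ≤-sorted stream, the scan's output is strictly increasing
theorem pv_dedup_pairwise (l : List (String × String))
    (hs : l.Pairwise (fun a b => toLex a ≤ toLex b)) :
    ∀ prev : Option (String × String), (∀ x ∈ l, ∀ q, prev = some q → toLex q ≤ toLex x) →
    (pvDedup prev l).Pairwise (fun a b => toLex a < toLex b)
      ∧ ∀ x ∈ pvDedup prev l, ∀ q, prev = some q → toLex q < toLex x := by
  induction l with
  | nil => intro prev _; exact ⟨List.Pairwise.nil, by intro x hx; cases hx⟩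
  | cons p rest ih =>
      intro prev hC
      obtain ⟨hhead, hrest⟩ := List.pairwise_cons.mp hs
      by_cases hp : prev = some p
      · rw [pvDedup, if_pos hp]
        exact ih hrest prev (fun x hx q hq => by
          rw [hp] at hq; cases hq
          exact hhead x hx)
      · rw [pvDedup, if_neg hp]
        obtain ⟨ihpw, ihbd⟩ := ih hrest (some p) (fun x hx q hq => by cases hq; exact hhead x hx)
        constructor
        · exact List.pairwise_cons.mpr ⟨fun x hx => ihbd x hx p rfl, ihpw⟩
        · intro x hx q hq
          rcases List.mem_cons.mp hx with rfl | h
          · have hle : toLex q ≤ toLex x := hC x List.mem_cons_self q hq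
            have hne : toLex q ≠ toLex x := fun he =>
              hp (hq.trans (congrArg some (toLex.injective he)))
            exact lt_of_le_of_ne hle hne
          · exact lt_trans (by
              have hle : toLex q ≤ toLex p := hC p List.mem_cons_self q hq
              have hne : toLex q ≠ toLex p := fun he =>
                hp (hq.trans (congrArg some (toLex.injective he)))
              exact lt_of_le_of_ne hle hne) (ihbd x h p rfl)

-- the central fact: B's dedupe-by-adjacency over the sorted raw stream is exactly A's pair list
theorem pv_pairs_eq (relationships : List (String × List (String × String))) :
    pvDedup none (PySem.List.sorted2 (pvRaw relationships) (fun p => p.1) (fun p => p.2))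
      = pvPairsA relationships := by
  rw [pv_sorted2_eq_sorted_lex]
  set s := PySem.List.sorted (pvRaw relationships) (fun p => toLex p) with hsdef
  have hpw : (pvDedup none s).Pairwise (fun a b => toLex a < toLex b) :=
    (pv_dedup_pairwise s (PySem.List.sorted_pairwise _ _) none (by intro x _ q hq; cases hq)).1
  have hnd : (pvDedup none s).Nodup :=
    hpw.imp (fun h => fun he => absurd (he ▸ h) (lt_irrefl _))
  have hmem : ∀ x, x ∈ pvDedup none s ↔ x ∈ pvRaw relationships := by
    intro x
    constructor
    · intro hx
      exact (PySem.List.sorted_perm _ _ _).mem_iff.mp (pv_dedup_subset _ _ _ hx)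
    · intro hx
      rcases pv_dedup_cover none s x ((PySem.List.sorted_perm _ _ _).mem_iff.mpr hx) with h | h
      · exact h
      · cases h
  have hperm : (pvDedup none s).Perm (pvPairsA relationships) := by
    refine (List.perm_ext_iff_of_nodup hnd (pv_pairsA_nodup relationships)).mpr (fun x => ?_)
    rw [hmem, pv_pairsA_mem]
  exact hperm.eq_of_pairwise (fun a b _ _ h1 h2 => absurd h2 (lt_asymm h1)) hpw (pv_pairsA_pairwise relationships)

-- ===== VERDICT (by name: the statement is the Claim_ definition above) =====
theorem generate_relationships_interface_spec : Claim_equal_generate_relationships_interface := by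
  intro relationships _
  unfold Spec_generate_relationships_interface
  simp only [generate_relationships_interface, generate_relationships_interface_alt]
  -- collapse A's build loop to a fold over the flat pair stream
  rw [show (fun (rm : PySem.Dict String (PySem.Set String)) (cf : String × String) =>
        let rm' := if rm.contains cf.2 then rm else rm.insert cf.2 PySem.Set.empty
        rm'.modify cf.2 PySem.Set.empty (fun s => PySem.Set.add s cf.1))
      = (fun rm cf => rm.modify cf.2 PySem.Set.empty (fun s => PySem.Set.add s cf.1)) from
    funext fun rm => funext fun cf => pv_step_modify rm cf.2 cf.1]
  rw [pv_foldl_raw relationships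
    (fun d p => d.modify p.1 PySem.Set.empty (fun s => PySem.Set.add s p.2)) PySem.Dict.empty]
  -- A's nested append loops are a flatMap of maps, i.e. a map over pvPairsA
  rw [show (fun (acc : List String) (g : String × PySem.Set String) =>
        (PySem.List.sorted g.2 (fun c => c)).foldl
          (fun acc column => acc ++ [mkCacheLine g.1 column]) acc)
      = (fun acc g => acc ++ ((PySem.List.sorted g.2 (fun c => c)).map (fun c => mkCacheLine g.1 c))) from
    funext fun acc => funext fun g => PySem.List.foldl_append_singleton_eq_map _ _ _]
  rw [PySem.List.foldl_append_eq_flatMap]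
  have hA : (PySem.List.sorted (pvDictA relationships).items (fun p => p.1)).flatMap
        (fun g => (PySem.List.sorted g.2 (fun c => c)).map (fun c => mkCacheLine g.1 c))
      = (pvPairsA relationships).map (fun p => mkCacheLine p.1 p.2) := by
    simp only [pvPairsA, List.map_flatMap, List.map_map, Function.comp_def]
  -- B's scan is map-line over the deduped sorted stream, which equals pvPairsA
  rw [pv_scan_eq_dedup]
  rw [show List.foldl (fun d p => d.modify p.1 PySem.Set.empty fun s => s.add p.2)
        PySem.Dict.empty (pvRaw relationships) = pvDictA relationships from rfl,
    List.nil_append, hA,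
    show relationships.flatMap (fun t => t.2.map (fun cf => (cf.2, cf.1))) = pvRaw relationships from rfl,
    pv_pairs_eq, List.nil_append]
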